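-- pv_equiv track=rewrite | github.com/Engmustafaelbadry/DuckyDu | scripts/pi/wifi_status_bridge.py | _parse_nmcli_multiline_blocks
-- ===== SOURCE A (Python) =====
-- def _parse_nmcli_multiline_blocks(output: str):
--     blocks = []
--     current = {}
--
--     for raw_line in output.splitlines():
--         line = raw_line.strip()
--         if not line:
--             if current:
--                 blocks.append(current)
--                 current = {}
--             continue
--
--         if ":" not in line:
--             continue
--
--         key, value = line.split(":", 1)
--         current[key.strip().lower()] = value.strip()
--
--     if current:
--         blocks.append(current)
--
--     return blocks
-- ===== SOURCE B (Python) =====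
-- from itertools import groupby
--
--
-- def _parse_block(group):
--     block = {}
--     for raw_line in group:
--         line = raw_line.strip()
--         if ":" in line:
--             key, value = line.split(":", 1)
--             block[key.strip().lower()] = value.strip()
--     return block
--
--
-- def _parse_nmcli_multiline_blocks(output: str):
--     blocks = []
--     for blank, group in groupby(output.splitlines(), key=lambda l: not l.strip()):
--         if blank:
--             continue
--         block = _parse_block(group)
--         if block:
--             blocks.append(block)
--     return blocks
-- ===== Notes on version B (the rewrite author's own statement) =====
-- stated objective: alternative
-- what changed: Replaces A's single pass with a mutable current-block accumulator by a group-first decomposition: itertools.groupby splits the lines into blank/non-blank runs, each non-blank run is parsed into its own dict, and empty dicts are dropped.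
import Mathlib
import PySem

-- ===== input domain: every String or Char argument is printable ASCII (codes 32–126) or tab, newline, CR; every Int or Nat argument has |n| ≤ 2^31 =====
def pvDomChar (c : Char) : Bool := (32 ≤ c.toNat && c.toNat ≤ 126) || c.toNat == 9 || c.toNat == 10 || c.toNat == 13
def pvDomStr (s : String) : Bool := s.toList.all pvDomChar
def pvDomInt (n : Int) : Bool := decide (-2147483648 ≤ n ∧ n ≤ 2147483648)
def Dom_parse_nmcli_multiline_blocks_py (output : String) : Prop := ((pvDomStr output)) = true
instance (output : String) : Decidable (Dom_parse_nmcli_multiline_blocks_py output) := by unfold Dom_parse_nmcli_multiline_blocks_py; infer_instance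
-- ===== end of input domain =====

-- B regroups the lines first (a hand-rolled itertools.groupby on blankness) and parses each
-- non-blank run into its own dict, instead of A's single pass with a mutable current-block
-- accumulator; objective: alternative decomposition, same value everywhere.

-- ===== PORT A =====
def parse_nmcli_multiline_blocks_py (output : String) : List (List (String × String)) :=
  let step := fun (st : List (List (String × String)) × PySem.Dict String String) (raw_line : String) =>
    let line := PySem.Str.strip raw_line
    if line == "" then
      if st.2.items.isEmpty then st else (st.1 ++ [st.2.items], PySem.Dict.empty)
    else if PySem.Str.isIn ":" line then
      match PySem.Str.splitMax? line ":" 1 with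
      | some [key, value] =>
          (st.1, st.2.insert (PySem.Str.lower (PySem.Str.strip key)) (PySem.Str.strip value))
      | _ => st
    else st
  let st := (PySem.Str.splitlines output).foldl step ([], PySem.Dict.empty)
  if st.2.items.isEmpty then st.1 else st.1 ++ [st.2.items]

-- ===== PORT B =====
-- the groupby key: 'not l.strip()'
def pvBlank (l : String) : Bool := PySem.Str.strip l == ""

-- hand port of itertools.groupby(lines, key=pvBlank): maximal runs of equal key
def pvGroupRuns : List String → List (Bool × List String)
  | [] => []
  | l :: ls =>
    match pvGroupRuns ls with
    | (k, g) :: rest =>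
        if pvBlank l == k then (k, l :: g) :: rest
        else (pvBlank l, [l]) :: (k, g) :: rest
    | [] => [(pvBlank l, [l])]

-- _parse_block
def pvParseBlock (group : List String) : PySem.Dict String String :=
  group.foldl (fun block raw_line =>
    let line := PySem.Str.strip raw_line
    if PySem.Str.isIn ":" line then
      match PySem.Str.splitMax? line ":" 1 with
      | none => block
      | some [] => block
      | some [_] => block
      | some [key, value] =>
          block.insert (PySem.Str.lower (PySem.Str.strip key)) (PySem.Str.strip value)
      | some (_ :: _ :: _ :: _) => block
    else block) PySem.Dict.empty

def parse_nmcli_multiline_blocks_py_alt (output : String) : List (List (String × String)) :=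
  (pvGroupRuns (PySem.Str.splitlines output)).foldl
    (fun blocks kg =>
      if kg.1 then blocks
      else
        let block := pvParseBlock kg.2
        if block.items.isEmpty then blocks else blocks ++ [block.items]) []

-- ===== PRECONDITION & SPEC =====
def Spec_parse_nmcli_multiline_blocks_py (output : String) (out : List (List (String × String))) : Prop := out = parse_nmcli_multiline_blocks_py_alt output
instance (output : String) (out : List (List (String × String))) : Decidable (Spec_parse_nmcli_multiline_blocks_py output out) := by unfold Spec_parse_nmcli_multiline_blocks_py; infer_instance

-- ===== CLAIM (what is proved, stated in full; the proofs are below) =====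
def Claim_equal_parse_nmcli_multiline_blocks_py : Prop := ∀ (output : String), Dom_parse_nmcli_multiline_blocks_py output → Spec_parse_nmcli_multiline_blocks_py output (parse_nmcli_multiline_blocks_py output)

-- ===== LEMMAS AND PROOFS =====

-- proof-side names for the two loop bodies and the emit/finish steps
def pvUpd (d : PySem.Dict String String) (raw_line : String) : PySem.Dict String String :=
  let line := PySem.Str.strip raw_line
  if PySem.Str.isIn ":" line then
    match PySem.Str.splitMax? line ":" 1 with
    | none => d
    | some [] => d
    | some [_] => d
    | some [key, value] =>
        d.insert (PySem.Str.lower (PySem.Str.strip key)) (PySem.Str.strip value)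
    | some (_ :: _ :: _ :: _) => d
  else d

def pvStepA (st : List (List (String × String)) × PySem.Dict String String) (raw_line : String) :
    List (List (String × String)) × PySem.Dict String String :=
  let line := PySem.Str.strip raw_line
  if line == "" then
    if st.2.items.isEmpty then st else (st.1 ++ [st.2.items], PySem.Dict.empty)
  else if PySem.Str.isIn ":" line then
    match PySem.Str.splitMax? line ":" 1 with
    | some [key, value] =>
        (st.1, st.2.insert (PySem.Str.lower (PySem.Str.strip key)) (PySem.Str.strip value))
    | _ => st
  else st

def pvStepB (blocks : List (List (String × String))) (kg : Bool × List String) :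
    List (List (String × String)) :=
  if kg.1 then blocks
  else
    let block := pvParseBlock kg.2
    if block.items.isEmpty then blocks else blocks ++ [block.items]

def pvEmit (d : PySem.Dict String String) : List (List (String × String)) :=
  if d.items.isEmpty then [] else [d.items]

-- A's single pass, seen as a spec recursion on the lines
def pvRun : PySem.Dict String String → List String → List (List (String × String))
  | cur, [] => pvEmit cur
  | cur, l :: ls =>
      if pvBlank l then pvEmit cur ++ pvRun PySem.Dict.empty ls
      else pvRun (pvUpd cur l) ls

-- B's group pass with an explicit carried dict
def pvProc : PySem.Dict String String → List (Bool × List String) → List (List (String × String))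
  | cur, [] => pvEmit cur
  | cur, (k, g) :: rest =>
      if k then pvEmit cur ++ pvProc PySem.Dict.empty rest
      else pvProc (g.foldl pvUpd cur) rest

theorem pvDict_eq_empty (d : PySem.Dict String String) (h : d.items.isEmpty = true) :
    d = PySem.Dict.empty := by
  apply PySem.Dict.ext; simp_all [PySem.Dict.empty]

theorem pvEmit_empty : pvEmit PySem.Dict.empty = [] := rfl

theorem pvStepA_nonblank (st : List (List (String × String)) × PySem.Dict String String)
    (l : String) (h : (PySem.Str.strip l == "") = false) : pvStepA st l = (st.1, pvUpd st.2 l) := by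
  cases st with
  | mk a b =>
    unfold pvStepA pvUpd
    rw [if_neg (by simp [h])]
    dsimp only
    by_cases hc : PySem.Str.isIn ":" (PySem.Str.strip l)
    · simp only [hc, if_true]
      rcases hsp : PySem.Str.splitMax? (PySem.Str.strip l) ":" 1 with _ | ⟨_ | ⟨k, _ | ⟨v, _ | ⟨w, rest⟩⟩⟩⟩ <;> rfl
    · simp only [hc, Bool.false_eq_true, if_false]

theorem pvStepA_blank_empty (st : List (List (String × String)) × PySem.Dict String String)
    (l : String) (h : (PySem.Str.strip l == "") = true) (he : st.2.items.isEmpty = true) :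
    pvStepA st l = st := by
  unfold pvStepA
  rw [if_pos (by simp [h]), if_pos he]

theorem pvStepA_blank_nonempty (st : List (List (String × String)) × PySem.Dict String String)
    (l : String) (h : (PySem.Str.strip l == "") = true) (he : st.2.items.isEmpty = false) :
    pvStepA st l = (st.1 ++ [st.2.items], PySem.Dict.empty) := by
  unfold pvStepA
  rw [if_pos (by simp [h]), if_neg (by simp [he])]

theorem pvParseBlock_eq (g : List String) :
    pvParseBlock g = g.foldl pvUpd PySem.Dict.empty := rfl

theorem pvA_eq_run (lines : List String) :
    ∀ (blocks : List (List (String × String))) (cur : PySem.Dict String String),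
      (let st := lines.foldl pvStepA (blocks, cur);
        if st.2.items.isEmpty then st.1 else st.1 ++ [st.2.items]) = blocks ++ pvRun cur lines := by
  induction lines with
  | nil =>
    intro blocks cur
    simp only [List.foldl_nil, pvRun, pvEmit]
    by_cases h : cur.items.isEmpty <;> simp [h]
  | cons l ls ih =>
    intro blocks cur
    simp only [List.foldl_cons]
    cases hb : pvBlank l with
    | true =>
      have hb' : (PySem.Str.strip l == "") = true := hb
      cases he : cur.items.isEmpty with
      | true =>
        have hc : cur = PySem.Dict.empty := pvDict_eq_empty cur he
        rw [pvStepA_blank_empty (blocks, cur) l hb' he, ih]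
        simp only [pvRun, hb, if_true, hc, pvEmit_empty, List.nil_append]
      | false =>
        rw [pvStepA_blank_nonempty (blocks, cur) l hb' he, ih]
        simp only [pvRun, hb, if_true, pvEmit, he, Bool.false_eq_true, if_false,
          List.append_assoc, List.singleton_append]
    | false =>
      have hb' : (PySem.Str.strip l == "") = false := hb
      rw [pvStepA_nonblank (blocks, cur) l hb', ih]
      simp only [pvRun, hb, Bool.false_eq_true, if_false]

set_option maxHeartbeats 1000000 in
theorem pvRun_eq_proc (lines : List String) :
    ∀ (cur : PySem.Dict String String), pvRun cur lines = pvProc cur (pvGroupRuns lines) := by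
  induction lines with
  | nil => intro cur; rfl
  | cons l ls ih =>
    intro cur
    cases hb : pvBlank l with
    | true =>
      cases hg : pvGroupRuns ls with
      | nil =>
        have hG : pvGroupRuns (l :: ls) = [(pvBlank l, [l])] := by unfold pvGroupRuns; rw [hg]
        rw [hG, hb]
        simp only [pvRun, hb, if_true, pvProc]
        rw [ih, hg]
        simp only [pvProc, pvEmit_empty]
      | cons p rest =>
        obtain ⟨k, g⟩ := p
        cases k with
        | true =>
          have hG : pvGroupRuns (l :: ls) = (true, l :: g) :: rest := by
            unfold pvGroupRuns; rw [hg, hb]; rfl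
          rw [hG]
          simp only [pvRun, hb, if_true, pvProc]
          rw [ih, hg]
          simp only [pvProc, if_true, pvEmit_empty, List.nil_append]
        | false =>
          have hG : pvGroupRuns (l :: ls) = (true, [l]) :: (false, g) :: rest := by
            unfold pvGroupRuns; rw [hg, hb]; rfl
          rw [hG]
          simp only [pvRun, hb, if_true, pvProc]
          rw [ih, hg]
          simp only [pvProc, Bool.false_eq_true, if_false]
    | false =>
      cases hg : pvGroupRuns ls with
      | nil =>
        have hG : pvGroupRuns (l :: ls) = [(pvBlank l, [l])] := by unfold pvGroupRuns; rw [hg]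
        rw [hG, hb]
        simp only [pvRun, hb, Bool.false_eq_true, if_false, pvProc, List.foldl_cons,
          List.foldl_nil]
        rw [ih, hg]
        rfl
      | cons p rest =>
        obtain ⟨k, g⟩ := p
        cases k with
        | true =>
          have hG : pvGroupRuns (l :: ls) = (false, [l]) :: (true, g) :: rest := by
            unfold pvGroupRuns; rw [hg, hb]; rfl
          rw [hG]
          simp only [pvRun, hb, Bool.false_eq_true, if_false, pvProc, List.foldl_cons,
            List.foldl_nil]
          rw [ih, hg]
          simp only [pvProc, if_true]
        | false =>
          have hG : pvGroupRuns (l :: ls) = (false, l :: g) :: rest := by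
            unfold pvGroupRuns; rw [hg, hb]; rfl
          rw [hG]
          simp only [pvRun, hb, Bool.false_eq_true, if_false, pvProc, List.foldl_cons]
          rw [ih, hg]
          simp only [pvProc, Bool.false_eq_true, if_false]

theorem pvGroupRuns_chain (lines : List String) :
    (pvGroupRuns lines).IsChain (fun a b => a.1 ≠ b.1) := by
  induction lines with
  | nil => simp [pvGroupRuns]
  | cons l ls ih =>
    cases hg : pvGroupRuns ls with
    | nil =>
      have hG : pvGroupRuns (l :: ls) = [(pvBlank l, [l])] := by unfold pvGroupRuns; rw [hg]
      rw [hG]; simp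
    | cons p rest =>
      obtain ⟨k, g⟩ := p
      rw [hg] at ih
      by_cases hk : pvBlank l == k
      · have hG : pvGroupRuns (l :: ls) = (k, l :: g) :: rest := by
          unfold pvGroupRuns; rw [hg]; dsimp only; rw [if_pos hk]
        rw [hG]
        cases rest with
        | nil => simp
        | cons q r2 =>
          rw [List.isChain_cons_cons] at ih ⊢
          exact ih
      · have hG : pvGroupRuns (l :: ls) = (pvBlank l, [l]) :: (k, g) :: rest := by
          unfold pvGroupRuns; rw [hg]; dsimp only; rw [if_neg hk]
        rw [hG, List.isChain_cons_cons]
        exact ⟨by simpa using hk, ih⟩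

theorem pvProc_shift (d : PySem.Dict String String) (rest : List (Bool × List String))
    (h : rest = [] ∨ ∃ g2 r2, rest = (true, g2) :: r2) :
    pvProc d rest = pvEmit d ++ pvProc PySem.Dict.empty rest := by
  rcases h with h | ⟨g2, r2, h⟩ <;> subst h
  · simp [pvProc, pvEmit_empty]
  · simp only [pvProc, if_true, pvEmit_empty, List.nil_append]

theorem pvB_eq_proc (gs : List (Bool × List String)) :
    ∀ (acc : List (List (String × String))), gs.IsChain (fun a b => a.1 ≠ b.1) →
      gs.foldl pvStepB acc = acc ++ pvProc PySem.Dict.empty gs := by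
  induction gs with
  | nil => intro acc _; simp [pvProc, pvEmit_empty]
  | cons p rest ih =>
    intro acc hch
    obtain ⟨k, g⟩ := p
    have hch' : rest.IsChain (fun a b => a.1 ≠ b.1) := hch.tail
    cases k with
    | true =>
      simp only [List.foldl_cons, pvStepB, if_true]
      rw [ih acc hch']
      simp only [pvProc, if_true, pvEmit_empty, List.nil_append]
    | false =>
      have hstep : pvStepB acc (false, g) = acc ++ pvEmit (pvParseBlock g) := by
        simp only [pvStepB, Bool.false_eq_true, if_false, pvEmit]
        split <;> simp
      simp only [List.foldl_cons, hstep]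
      rw [ih _ hch']
      have hshape : rest = [] ∨ ∃ g2 r2, rest = (true, g2) :: r2 := by
        cases rest with
        | nil => exact Or.inl rfl
        | cons q r2 =>
          obtain ⟨k2, g2⟩ := q
          rw [List.isChain_cons_cons] at hch
          have hk2 : k2 = true := by
            cases k2
            · exact absurd rfl hch.1
            · rfl
          exact Or.inr ⟨g2, r2, by rw [hk2]⟩
      simp only [pvProc, Bool.false_eq_true, if_false, ← pvParseBlock_eq]
      rw [pvProc_shift (pvParseBlock g) rest hshape, List.append_assoc]

-- ===== VERDICT (by name: the statement is the Claim_ definition above) =====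
theorem parse_nmcli_multiline_blocks_py_spec : Claim_equal_parse_nmcli_multiline_blocks_py := by
  intro output _
  show parse_nmcli_multiline_blocks_py output = parse_nmcli_multiline_blocks_py_alt output
  have hA : parse_nmcli_multiline_blocks_py output
      = (let st := (PySem.Str.splitlines output).foldl pvStepA ([], PySem.Dict.empty);
         if st.2.items.isEmpty then st.1 else st.1 ++ [st.2.items]) := rfl
  have hB : parse_nmcli_multiline_blocks_py_alt output
      = (pvGroupRuns (PySem.Str.splitlines output)).foldl pvStepB [] := rfl
  rw [hA, hB, pvA_eq_run, pvRun_eq_proc, pvB_eq_proc _ _ (pvGroupRuns_chain _), List.nil_append]
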